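-- pv_equiv track=rewrite | github.com/Zoe-Lurie/AdventOfCode2024 | day7.py | part1
-- ===== SOURCE A (Python) =====
-- def part1(lines):
--     total = 0
--
--     for result, nums in lines:
--         possibleResults = [nums[0]]
--
--         for n in nums[1:]:
--             possibleResults = [n + r for r in possibleResults if n + r <= result] \
--                 + [n * r for r in possibleResults if n * r <= result]
--
--         if result in possibleResults:
--             total += result
--
--     return total
-- ===== SOURCE B (Python) =====
-- def _search(result, acc, nums, i):
--     # depth-first over operator choices; a candidate value is explored only if <= result
--     if i == len(nums):
--         return acc == result
--     s = acc + nums[i]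
--     if s <= result and _search(result, s, nums, i + 1):
--         return True
--     p = acc * nums[i]
--     return p <= result and _search(result, p, nums, i + 1)
--
-- def part1(lines):
--     return sum(result for result, nums in lines if _search(result, nums[0], nums, 1))
-- ===== Notes on version B (the rewrite author's own statement) =====
-- stated objective: alternative
-- what changed: Replaces A's breadth-first rebuilding of the full list of reachable partial results per line with a short-circuiting depth-first recursion over the operator choices (exploring a candidate only when it is <= result, returning on the first successful path), summed via a generator; no intermediate collections are built.
import Mathlib
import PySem

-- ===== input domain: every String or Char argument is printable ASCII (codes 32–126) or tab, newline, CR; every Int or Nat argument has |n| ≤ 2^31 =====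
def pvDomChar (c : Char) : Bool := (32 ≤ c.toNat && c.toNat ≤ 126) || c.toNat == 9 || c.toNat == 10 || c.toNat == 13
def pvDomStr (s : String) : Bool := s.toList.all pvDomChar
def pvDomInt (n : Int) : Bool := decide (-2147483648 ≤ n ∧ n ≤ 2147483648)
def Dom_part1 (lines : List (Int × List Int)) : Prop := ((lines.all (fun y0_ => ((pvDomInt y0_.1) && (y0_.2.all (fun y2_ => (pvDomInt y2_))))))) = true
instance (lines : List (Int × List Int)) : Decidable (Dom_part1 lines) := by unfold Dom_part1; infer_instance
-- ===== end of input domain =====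

-- B replaces A's breadth-first level-list construction by a short-circuiting depth-first
-- recursion over the operator choices (objective: alternative).


-- ===== PORT A =====
-- A: per line, possibleResults starts as [nums[0]]; each further n rebuilds the list from the
-- two comprehensions [n+r …] ++ [n*r …] (duplicates kept); add result to total if it is in the list.
def part1 (lines : List (Int × List Int)) : Int :=
  lines.foldl (fun total line =>
    let result := line.1
    match line.2 with
    | [] => total  -- nums[0] raises IndexError in Python; excluded by Pre_part1
    | h :: t =>
      let possible := t.foldl (fun acc n =>
        acc.filterMap (fun r => if n + r ≤ result then some (n + r) else none) ++
        acc.filterMap (fun r => if n * r ≤ result then some (n * r) else none)) [h]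
      if result ∈ possible then total + result else total) 0

-- ===== PORT B =====
-- B's recursion on the remaining numbers (Python indexes with i; the port recurses on the suffix).
def searchB (result acc : Int) : List Int → Bool
  | [] => acc == result
  | n :: rest =>
    (decide (acc + n ≤ result) && searchB result (acc + n) rest) ||
    (decide (acc * n ≤ result) && searchB result (acc * n) rest)

def part1_alt (lines : List (Int × List Int)) : Int :=
  lines.foldl (fun total line =>
    match line.2 with
    | [] => total  -- nums[0] raises IndexError in Python; excluded by Pre_part1
    | h :: t => if searchB line.1 h t then total + line.1 else total) 0

-- ===== PRECONDITION & SPEC =====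
-- A (and B) evaluate nums[0], which raises IndexError on an empty number list.
def Pre_part1 (lines : List (Int × List Int)) : Prop := ∀ p ∈ lines, p.2 ≠ []
instance (lines : List (Int × List Int)) : Decidable (Pre_part1 lines) := by unfold Pre_part1; infer_instance
def pvWitness_part1 : (List (Int × List Int)) := [(3, [1, 2]), (10, [2, 3])]

def Spec_part1 (lines : List (Int × List Int)) (out : Int) : Prop := out = part1_alt lines
instance (lines : List (Int × List Int)) (out : Int) : Decidable (Spec_part1 lines out) := by unfold Spec_part1; infer_instance

-- ===== CLAIM (what is proved, stated in full; the proofs are below) =====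
def Claim_equal_part1 : Prop := ∀ (lines : List (Int × List Int)), Dom_part1 lines → Pre_part1 lines → Spec_part1 lines (part1 lines)

-- ===== LEMMAS AND PROOFS =====

-- membership in A's one-step list
theorem mem_stepA (result n : Int) (acc : List Int) (x : Int) :
    x ∈ (acc.filterMap (fun r => if n + r ≤ result then some (n + r) else none) ++
         acc.filterMap (fun r => if n * r ≤ result then some (n * r) else none)) ↔
    ∃ r ∈ acc, (x = n + r ∧ n + r ≤ result) ∨ (x = n * r ∧ n * r ≤ result) := by
  simp only [List.mem_append, List.mem_filterMap]
  constructor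
  · rintro (⟨r, hr, h⟩ | ⟨r, hr, h⟩) <;> [(refine ⟨r, hr, Or.inl ?_⟩); (refine ⟨r, hr, Or.inr ?_⟩)] <;>
      (split at h <;> simp_all)
  · rintro ⟨r, hr, (⟨rfl, hle⟩ | ⟨rfl, hle⟩)⟩
    · exact Or.inl ⟨r, hr, by simp [hle]⟩
    · exact Or.inr ⟨r, hr, by simp [hle]⟩

-- result is in A's final level list iff some start value in acc admits a successful DFS path
theorem foldA_mem_iff_search (result : Int) (t : List Int) (acc : List Int) :
    (result ∈ t.foldl (fun acc n =>
        acc.filterMap (fun r => if n + r ≤ result then some (n + r) else none) ++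
        acc.filterMap (fun r => if n * r ≤ result then some (n * r) else none)) acc) ↔
    ∃ r ∈ acc, searchB result r t = true := by
  induction t generalizing acc with
  | nil => simp [searchB]
  | cons n t ih =>
    simp only [List.foldl_cons]
    rw [ih]
    constructor
    · rintro ⟨r', hr', hs⟩
      rw [mem_stepA] at hr'
      obtain ⟨r, hr, (⟨rfl, hle⟩ | ⟨rfl, hle⟩)⟩ := hr'
      · exact ⟨r, hr, by simp [searchB, Int.add_comm r n, hle, hs]⟩
      · exact ⟨r, hr, by simp [searchB, Int.mul_comm r n, hle, hs]⟩
    · rintro ⟨r, hr, hs⟩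
      simp only [searchB, Bool.or_eq_true, Bool.and_eq_true, decide_eq_true_eq] at hs
      rcases hs with ⟨hle, hs⟩ | ⟨hle, hs⟩
      · exact ⟨r + n, (mem_stepA result n acc _).mpr ⟨r, hr, Or.inl ⟨(Int.add_comm r n), by rwa [Int.add_comm n r]⟩⟩, hs⟩
      · exact ⟨r * n, (mem_stepA result n acc _).mpr ⟨r, hr, Or.inr ⟨(Int.mul_comm r n), by rwa [Int.mul_comm n r]⟩⟩, hs⟩

-- the two per-line folds agree given every nums is nonempty
theorem fold_eq (lines : List (Int × List Int)) (total : Int) (hpre : Pre_part1 lines) :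
    lines.foldl (fun total line =>
      let result := line.1
      match line.2 with
      | [] => total
      | h :: t =>
        let possible := t.foldl (fun acc n =>
          acc.filterMap (fun r => if n + r ≤ result then some (n + r) else none) ++
          acc.filterMap (fun r => if n * r ≤ result then some (n * r) else none)) [h]
        if result ∈ possible then total + result else total) total =
    lines.foldl (fun total line =>
      match line.2 with
      | [] => total
      | h :: t => if searchB line.1 h t then total + line.1 else total) total := by
  induction lines generalizing total with
  | nil => rfl
  | cons line rest ih =>
    obtain ⟨result, nums⟩ := line
    have hne : nums ≠ [] := hpre (result, nums) (List.mem_cons_self)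
    have hrest : Pre_part1 rest := fun p hp => hpre p (List.mem_cons_of_mem _ hp)
    cases nums with
    | nil => exact absurd rfl hne
    | cons h t =>
      simp only [List.foldl_cons]
      rw [ih _ hrest]
      congr 1
      have hc : (result ∈ t.foldl (fun acc n =>
          acc.filterMap (fun r => if n + r ≤ result then some (n + r) else none) ++
          acc.filterMap (fun r => if n * r ≤ result then some (n * r) else none)) [h]) ↔
          (searchB result h t = true) := by
        rw [foldA_mem_iff_search]; simp
      exact if_congr hc rfl rfl

-- ===== VERDICT (by name: the statement is the Claim_ definition above) =====
theorem part1_spec : Claim_equal_part1 := by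
  intro lines _ hpre
  unfold Spec_part1 part1 part1_alt
  exact fold_eq lines 0 hpre
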